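-- pv_equiv track=rewrite | github.com/jonathonreilly/toy-physics | scripts/frontier_s3_cap_link_formal.py | cubical_ball_sites
-- ===== SOURCE A (Python) =====
-- def z3_ball_sites(R: int) -> list[tuple[int, int, int]]:
--     """All integer points within Euclidean distance R of origin."""
--     sites = []
--     for x in range(-R, R + 1):
--         for y in range(-R, R + 1):
--             for z in range(-R, R + 1):
--                 if x * x + y * y + z * z <= R * R:
--                     sites.append((x, y, z))
--     return sites
--
-- def cubical_ball_sites(R: int) -> tuple[set, set]:
--     """
--     Return the set of sites forming the CUBICAL ball: the union of all
--     unit cubes whose 8 corners all lie within Euclidean distance R of origin.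
--     Also returns the set of cubes (by min-corner).
--     """
--     euc_sites = set(z3_ball_sites(R))
--     cubes = set()
--     for s in euc_sites:
--         x, y, z = s
--         corners = [(x+dx, y+dy, z+dz) for dx in (0,1) for dy in (0,1) for dz in (0,1)]
--         if all(c in euc_sites for c in corners):
--             cubes.add(s)
--     cb_sites = set()
--     for cube in cubes:
--         x, y, z = cube
--         for dx in (0,1):
--             for dy in (0,1):
--                 for dz in (0,1):
--                     cb_sites.add((x+dx, y+dy, z+dz))
--     return cb_sites, cubes
-- ===== SOURCE B (Python) =====
-- def cubical_ball_sites(R: int) -> tuple[set, set]: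
--     """
--     Same cubical ball, but the per-point corner list and its 8 set-membership
--     lookups are replaced by a closed-form test: a unit cube with min-corner
--     (x, y, z) has all 8 corners within distance R of the origin iff its
--     FARTHEST corner does, i.e.
--         max(x*x, (x+1)**2) + max(y*y, (y+1)**2) + max(z*z, (z+1)**2) <= R*R.
--     """
--     RR = R * R
--     pts = set()
--     for x in range(-R, R + 1):
--         for y in range(-R, R + 1):
--             for z in range(-R, R + 1):
--                 if x * x + y * y + z * z <= RR:
--                     pts.add((x, y, z))
--     cubes = {(x, y, z) for (x, y, z) in pts
--              if max(x * x, (x + 1) * (x + 1)) + max(y * y, (y + 1) * (y + 1))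
--                 + max(z * z, (z + 1) * (z + 1)) <= RR}
--     cb_sites = {(x + dx, y + dy, z + dz) for (x, y, z) in cubes
--                 for dx in (0, 1) for dy in (0, 1) for dz in (0, 1)}
--     return cb_sites, cubes
-- ===== Notes on version B (the rewrite author's own statement) =====
-- stated objective: alternative
-- what changed: B drops the z3_ball_sites helper and, for each candidate point, the per-point corner list and its eight set-membership lookups: cube membership is decided by the closed-form worst-corner test max(x*x,(x+1)^2)+max(y*y,(y+1)^2)+max(z*z,(z+1)^2) <= R*R while scanning the ball-point set once; it trades the corner enumeration for an arithmetic test of the same asymptotic cost.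
import Mathlib
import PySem

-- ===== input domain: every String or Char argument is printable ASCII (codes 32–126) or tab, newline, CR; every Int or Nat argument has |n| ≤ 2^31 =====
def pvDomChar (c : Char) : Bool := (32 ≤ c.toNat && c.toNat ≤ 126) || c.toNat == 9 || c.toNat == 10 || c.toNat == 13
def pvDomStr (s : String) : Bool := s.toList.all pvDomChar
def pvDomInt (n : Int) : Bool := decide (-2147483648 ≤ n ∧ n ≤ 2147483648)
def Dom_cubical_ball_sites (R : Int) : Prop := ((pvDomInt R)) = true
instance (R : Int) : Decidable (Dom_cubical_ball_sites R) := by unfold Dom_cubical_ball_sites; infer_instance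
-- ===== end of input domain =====

-- B keeps A's ball-point set (same insertion order, so the returned sets are laid out
-- identically) but replaces the per-point corner list and its 8 set-membership lookups by the
-- closed-form worst-corner test max(x²,(x+1)²)+max(y²,(y+1)²)+max(z²,(z+1)²) ≤ R².
-- Python A returns sets; ports model them as PySem.Set in insertion order.


-- ===== PORT A =====
def z3_ball_sites (R : Int) : List (Int × Int × Int) :=
  (PySem.List.pyRange (-R) (R + 1)).foldl (fun sites x =>
    (PySem.List.pyRange (-R) (R + 1)).foldl (fun sites y =>
      (PySem.List.pyRange (-R) (R + 1)).foldl (fun sites z =>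
        if x * x + y * y + z * z ≤ R * R then sites ++ [(x, y, z)] else sites)
        sites) sites) []

def cubical_ball_sites (R : Int) : (List (Int × Int × Int)) × (List (Int × Int × Int)) :=
  let euc_sites : PySem.Set (Int × Int × Int) := PySem.Set.ofList (z3_ball_sites R)
  let cubes : PySem.Set (Int × Int × Int) :=
    euc_sites.foldl (fun cubes s =>
      let corners := [(0 : Int), 1].flatMap (fun dx => [(0 : Int), 1].flatMap (fun dy =>
        [(0 : Int), 1].map (fun dz => (s.1 + dx, s.2.1 + dy, s.2.2 + dz))))
      if corners.all (fun c => PySem.Set.contains euc_sites c) then PySem.Set.add cubes s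
      else cubes) PySem.Set.empty
  let cb_sites : PySem.Set (Int × Int × Int) :=
    cubes.foldl (fun cb cube =>
      [(0 : Int), 1].foldl (fun cb dx =>
        [(0 : Int), 1].foldl (fun cb dy =>
          [(0 : Int), 1].foldl (fun cb dz =>
            PySem.Set.add cb (cube.1 + dx, cube.2.1 + dy, cube.2.2 + dz)) cb) cb) cb)
      PySem.Set.empty
  (cb_sites, cubes)

-- ===== PORT B =====
def cubical_ball_sites_alt (R : Int) : (List (Int × Int × Int)) × (List (Int × Int × Int)) :=
  let RR := R * R
  let pts : PySem.Set (Int × Int × Int) :=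
    (PySem.List.pyRange (-R) (R + 1)).foldl (fun pts x =>
      (PySem.List.pyRange (-R) (R + 1)).foldl (fun pts y =>
        (PySem.List.pyRange (-R) (R + 1)).foldl (fun pts z =>
          if x * x + y * y + z * z ≤ RR then PySem.Set.add pts (x, y, z) else pts) pts) pts)
      PySem.Set.empty
  let cubes : PySem.Set (Int × Int × Int) :=
    pts.foldl (fun cubes s =>
      if max (s.1 * s.1) ((s.1 + 1) * (s.1 + 1)) + max (s.2.1 * s.2.1) ((s.2.1 + 1) * (s.2.1 + 1))
          + max (s.2.2 * s.2.2) ((s.2.2 + 1) * (s.2.2 + 1)) ≤ RR then PySem.Set.add cubes s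
      else cubes) PySem.Set.empty
  let cb_sites : PySem.Set (Int × Int × Int) :=
    cubes.foldl (fun cb cube =>
      [(0 : Int), 1].foldl (fun cb dx =>
        [(0 : Int), 1].foldl (fun cb dy =>
          [(0 : Int), 1].foldl (fun cb dz =>
            PySem.Set.add cb (cube.1 + dx, cube.2.1 + dy, cube.2.2 + dz)) cb) cb) cb)
      PySem.Set.empty
  (cb_sites, cubes)

-- ===== PRECONDITION & SPEC =====
def Spec_cubical_ball_sites (R : Int) (out : (List (Int × Int × Int)) × (List (Int × Int × Int))) : Prop := out = cubical_ball_sites_alt R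
instance (R : Int) (out : (List (Int × Int × Int)) × (List (Int × Int × Int))) : Decidable (Spec_cubical_ball_sites R out) := by unfold Spec_cubical_ball_sites; infer_instance

-- ===== CLAIM (what is proved, stated in full; the proofs are below) =====
def Claim_equal_cubical_ball_sites : Prop := ∀ (R : Int), Dom_cubical_ball_sites R → Spec_cubical_ball_sites R (cubical_ball_sites R)

-- ===== LEMMAS AND PROOFS =====

-- the full grid of candidate triples, in loop order
def tripList (R : Int) : List (Int × Int × Int) :=
  (PySem.List.pyRange (-R) (R + 1)).flatMap (fun x =>
    (PySem.List.pyRange (-R) (R + 1)).flatMap (fun y =>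
      (PySem.List.pyRange (-R) (R + 1)).map (fun z => (x, y, z))))

def predE (R : Int) (t : Int × Int × Int) : Bool :=
  decide (t.1 * t.1 + t.2.1 * t.2.1 + t.2.2 * t.2.2 ≤ R * R)

def predB (R : Int) (t : Int × Int × Int) : Bool :=
  decide (max (t.1 * t.1) ((t.1 + 1) * (t.1 + 1)) + max (t.2.1 * t.2.1) ((t.2.1 + 1) * (t.2.1 + 1))
    + max (t.2.2 * t.2.2) ((t.2.2 + 1) * (t.2.2 + 1)) ≤ R * R)

-- A's corner test, with euc_sites inlined
def pA (R : Int) (s : Int × Int × Int) : Bool :=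
  ([(0 : Int), 1].flatMap (fun dx => [(0 : Int), 1].flatMap (fun dy =>
    [(0 : Int), 1].map (fun dz => (s.1 + dx, s.2.1 + dy, s.2.2 + dz))))).all
    (fun c => PySem.Set.contains (PySem.Set.ofList (z3_ball_sites R)) c)

lemma z3_eq_filter (R : Int) : z3_ball_sites R = (tripList R).filter (predE R) := by
  unfold z3_ball_sites tripList
  simp only [List.filter_flatMap, List.filter_map]
  have hz : ∀ (x y : Int) (sites : List (Int × Int × Int)),
      (PySem.List.pyRange (-R) (R + 1)).foldl (fun sites z =>
        if x * x + y * y + z * z ≤ R * R then sites ++ [(x, y, z)] else sites) sites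
      = sites ++ ((PySem.List.pyRange (-R) (R + 1)).filter
          (predE R ∘ fun z => ((x, y, z) : Int × Int × Int))).map (fun z => ((x, y, z) : Int × Int × Int)) := by
    intro x y sites
    have h := PySem.List.foldl_append_if (fun z => decide (x * x + y * y + z * z ≤ R * R))
      (fun z => ((x, y, z) : Int × Int × Int)) (PySem.List.pyRange (-R) (R + 1)) sites
    simp only [decide_eq_true_eq] at h
    exact h
  calc (PySem.List.pyRange (-R) (R + 1)).foldl (fun sites x =>
        (PySem.List.pyRange (-R) (R + 1)).foldl (fun sites y =>
          (PySem.List.pyRange (-R) (R + 1)).foldl (fun sites z =>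
            if x * x + y * y + z * z ≤ R * R then sites ++ [(x, y, z)] else sites)
          sites) sites) []
      = (PySem.List.pyRange (-R) (R + 1)).foldl (fun sites x =>
          sites ++ (PySem.List.pyRange (-R) (R + 1)).flatMap (fun y =>
            ((PySem.List.pyRange (-R) (R + 1)).filter
              (predE R ∘ fun z => ((x, y, z) : Int × Int × Int))).map (fun z => ((x, y, z) : Int × Int × Int)))) [] := by
        congr 1
        funext sites x
        rw [← PySem.List.foldl_append_eq_flatMap]
        congr 1
        funext acc y
        exact hz x y acc
    _ = _ := by
        rw [PySem.List.foldl_append_eq_flatMap]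
        simp

lemma mem_tripList (R : Int) (t : Int × Int × Int) :
    t ∈ tripList R ↔ (-R ≤ t.1 ∧ t.1 ≤ R) ∧ (-R ≤ t.2.1 ∧ t.2.1 ≤ R) ∧ (-R ≤ t.2.2 ∧ t.2.2 ≤ R) := by
  obtain ⟨x, y, z⟩ := t
  simp [tripList, List.mem_flatMap, List.mem_map, PySem.List.mem_pyRange_one]

lemma mem_z3 (R : Int) (hR : 0 ≤ R) (t : Int × Int × Int) :
    t ∈ z3_ball_sites R ↔ t.1 * t.1 + t.2.1 * t.2.1 + t.2.2 * t.2.2 ≤ R * R := by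
  obtain ⟨x, y, z⟩ := t
  rw [z3_eq_filter, List.mem_filter]
  simp only [mem_tripList, predE, decide_eq_true_eq]
  constructor
  · rintro ⟨-, h⟩; exact h
  · intro h
    refine ⟨⟨⟨?_, ?_⟩, ⟨?_, ?_⟩, ?_, ?_⟩, h⟩ <;> nlinarith [mul_self_nonneg x, mul_self_nonneg y, mul_self_nonneg z]

-- conditional Set.add fold = filter then plain add fold
lemma foldl_add_if {α : Type} [BEq α] (p : α → Bool) (l : List α) (acc : PySem.Set α) :
    l.foldl (fun acc t => if p t then PySem.Set.add acc t else acc) acc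
      = (l.filter p).foldl PySem.Set.add acc := by
  induction l generalizing acc with
  | nil => rfl
  | cons x l ih =>
      simp only [List.foldl_cons, List.filter_cons]
      cases hp : p x <;> simp [ih]

lemma filter_add {α : Type} [BEq α] [LawfulBEq α] (p : α → Bool) (s : PySem.Set α) (x : α) :
    (PySem.Set.add s x).filter p = if p x then PySem.Set.add (s.filter p) x else s.filter p := by
  by_cases hx : x ∈ s <;> cases hp : p x <;>
    simp [PySem.Set.add, hx, hp, List.filter_append, List.mem_filter]

lemma filter_foldl_add {α : Type} [BEq α] [LawfulBEq α] (p : α → Bool) (l : List α) (acc : PySem.Set α) :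
    (l.foldl PySem.Set.add acc).filter p = (l.filter p).foldl PySem.Set.add (acc.filter p) := by
  induction l generalizing acc with
  | nil => rfl
  | cons x l ih =>
      simp only [List.foldl_cons, List.filter_cons]
      cases hp : p x <;> simp [ih, filter_add, hp]

lemma filter_ofList {α : Type} [BEq α] [LawfulBEq α] (p : α → Bool) (l : List α) :
    (PySem.Set.ofList l).filter p = PySem.Set.ofList (l.filter p) := by
  rw [PySem.Set.ofList_eq_foldl, PySem.Set.ofList_eq_foldl, filter_foldl_add]
  rfl

-- A's cubes = ofList of the pA-filtered ball list
lemma cubesA_eq (R : Int) :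
    (cubical_ball_sites R).2 = PySem.Set.ofList ((z3_ball_sites R).filter (pA R)) := by
  show (PySem.Set.ofList (z3_ball_sites R)).foldl
      (fun cubes s => if pA R s then PySem.Set.add cubes s else cubes) PySem.Set.empty
    = PySem.Set.ofList ((z3_ball_sites R).filter (pA R))
  rw [foldl_add_if, show (PySem.Set.empty : PySem.Set (Int × Int × Int)) = [] from rfl,
    ← PySem.Set.ofList_eq_foldl, filter_ofList,
    PySem.Set.ofList_eq_self_of_nodup _ (PySem.Set.nodup_ofList _)]

-- B's pts set = ofList of the ball list (the direct Set.add loop, flattened)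
lemma ptsB_eq (R : Int) :
    ((PySem.List.pyRange (-R) (R + 1)).foldl (fun pts x =>
      (PySem.List.pyRange (-R) (R + 1)).foldl (fun pts y =>
        (PySem.List.pyRange (-R) (R + 1)).foldl (fun pts z =>
          if x * x + y * y + z * z ≤ R * R then PySem.Set.add pts (x, y, z) else pts) pts) pts)
      PySem.Set.empty : PySem.Set (Int × Int × Int))
    = PySem.Set.ofList (z3_ball_sites R) := by
  rw [z3_eq_filter, PySem.Set.ofList_eq_foldl, ← foldl_add_if, tripList, List.foldl_flatMap]
  congr 1
  funext acc x
  rw [List.foldl_flatMap]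
  simp only [List.foldl_map]
  congr 1
  funext b y
  congr 1
  funext c z
  simp only [predE, decide_eq_true_eq]

-- B's cubes = ofList of the predB-filtered ball list
lemma cubesB_eq (R : Int) :
    (cubical_ball_sites_alt R).2
      = PySem.Set.ofList ((tripList R).filter (fun t => predB R t && predE R t)) := by
  show ((((PySem.List.pyRange (-R) (R + 1)).foldl (fun pts x =>
      (PySem.List.pyRange (-R) (R + 1)).foldl (fun pts y =>
        (PySem.List.pyRange (-R) (R + 1)).foldl (fun pts z =>
          if x * x + y * y + z * z ≤ R * R then PySem.Set.add pts (x, y, z) else pts) pts) pts)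
      PySem.Set.empty : PySem.Set (Int × Int × Int)).foldl
        (fun cubes s =>
          if max (s.1 * s.1) ((s.1 + 1) * (s.1 + 1)) + max (s.2.1 * s.2.1) ((s.2.1 + 1) * (s.2.1 + 1))
              + max (s.2.2 * s.2.2) ((s.2.2 + 1) * (s.2.2 + 1)) ≤ R * R then PySem.Set.add cubes s
          else cubes) PySem.Set.empty)
      : PySem.Set (Int × Int × Int))
    = PySem.Set.ofList ((tripList R).filter (fun t => predB R t && predE R t))
  have hstep : (fun (cubes : PySem.Set (Int × Int × Int)) (s : Int × Int × Int) =>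
      if max (s.1 * s.1) ((s.1 + 1) * (s.1 + 1)) + max (s.2.1 * s.2.1) ((s.2.1 + 1) * (s.2.1 + 1))
          + max (s.2.2 * s.2.2) ((s.2.2 + 1) * (s.2.2 + 1)) ≤ R * R then PySem.Set.add cubes s
      else cubes)
      = (fun (cubes : PySem.Set (Int × Int × Int)) s =>
          if predB R s then PySem.Set.add cubes s else cubes) := by
    funext c s
    simp only [predB, decide_eq_true_eq]
  rw [hstep, ptsB_eq, foldl_add_if, z3_eq_filter]
  rw [show (PySem.Set.empty : PySem.Set (Int × Int × Int)) = [] from rfl, ← PySem.Set.ofList_eq_foldl]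
  rw [filter_ofList, PySem.Set.ofList_eq_self_of_nodup _ (PySem.Set.nodup_ofList _),
    List.filter_filter]

-- the arithmetic core: on grid points, "in ball and all 8 corners in ball" = "worst corner in ball"
lemma core_eq (R : Int) (t : Int × Int × Int) (ht : t ∈ tripList R) :
    (pA R t && predE R t) = predB R t := by
  obtain ⟨x, y, z⟩ := t
  have hb := (mem_tripList R (x, y, z)).mp ht
  simp only at hb
  have hR : 0 ≤ R := by omega
  rw [Bool.eq_iff_iff]
  simp only [pA, predE, predB, Bool.and_eq_true, List.flatMap_cons, List.flatMap_nil,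
    List.map_cons, List.map_nil, List.append_nil, List.all_append, List.all_cons, List.all_nil,
    PySem.Set.contains_iff, PySem.Set.mem_ofList, mem_z3 R hR, decide_eq_true_eq, add_zero,
    and_true]
  constructor
  · rintro ⟨⟨⟨⟨h1, h2⟩, h3, h4⟩, ⟨h5, h6⟩, h7, h8⟩, -⟩
    rcases max_choice (x * x) ((x + 1) * (x + 1)) with hx | hx <;>
      rcases max_choice (y * y) ((y + 1) * (y + 1)) with hy | hy <;>
        rcases max_choice (z * z) ((z + 1) * (z + 1)) with hz | hz <;>
          rw [hx, hy, hz] <;> linarith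
  · intro h
    have lx1 := le_max_left (x * x) ((x + 1) * (x + 1))
    have lx2 := le_max_right (x * x) ((x + 1) * (x + 1))
    have ly1 := le_max_left (y * y) ((y + 1) * (y + 1))
    have ly2 := le_max_right (y * y) ((y + 1) * (y + 1))
    have lz1 := le_max_left (z * z) ((z + 1) * (z + 1))
    have lz2 := le_max_right (z * z) ((z + 1) * (z + 1))
    exact ⟨⟨⟨⟨by linarith, by linarith⟩, by linarith, by linarith⟩,
      ⟨by linarith, by linarith⟩, by linarith, by linarith⟩, by linarith⟩

-- predB forces predE (the (0,0,0) corner is dominated by the worst corner)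
lemma predB_imp_predE (R : Int) (t : Int × Int × Int) (h : predB R t = true) : predE R t = true := by
  obtain ⟨x, y, z⟩ := t
  simp only [predB, decide_eq_true_eq] at h
  simp only [predE, decide_eq_true_eq]
  have lx := le_max_left (x * x) ((x + 1) * (x + 1))
  have ly := le_max_left (y * y) ((y + 1) * (y + 1))
  have lz := le_max_left (z * z) ((z + 1) * (z + 1))
  linarith

-- the two cube lists coincide
lemma cubes_eq (R : Int) : (cubical_ball_sites R).2 = (cubical_ball_sites_alt R).2 := by
  rw [cubesA_eq, cubesB_eq, z3_eq_filter, List.filter_filter]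
  refine congrArg _ (List.filter_congr (fun t ht => ?_))
  rw [core_eq R t ht]
  cases hB : predB R t
  · rfl
  · rw [predB_imp_predE R t hB]; rfl

-- ===== VERDICT (by name: the statement is the Claim_ definition above) =====
theorem cubical_ball_sites_spec : Claim_equal_cubical_ball_sites := by
  intro R _
  show cubical_ball_sites R = cubical_ball_sites_alt R
  have h := cubes_eq R
  unfold cubical_ball_sites cubical_ball_sites_alt at h ⊢
  simp only at h ⊢
  rw [h]
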